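-- pv_equiv track=rewrite | github.com/Paulpandian-ai/fii-app | backend/functions/api_handler/handler.py | _detect_csv_mapping
-- ===== SOURCE A (Python) =====
-- def _detect_csv_mapping(headers):
--     """Auto-detect CSV column mapping for common brokerage formats."""
--     headers_lower = [h.lower().strip() for h in headers]
--     mapping = {}
--
--     # Ticker / Symbol
--     for pattern in ["symbol", "ticker", "stock symbol", "sym"]:
--         for i, h in enumerate(headers_lower):
--             if pattern in h:
--                 mapping["ticker"] = headers[i]
--                 break
--         if "ticker" in mapping:
--             break
--
--     # Shares / Quantity
--     for pattern in ["quantity", "shares", "qty", "units", "share"]: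
--         for i, h in enumerate(headers_lower):
--             if pattern in h and "price" not in h:
--                 mapping["shares"] = headers[i]
--                 break
--         if "shares" in mapping:
--             break
--
--     # Cost basis / Average cost
--     for pattern in ["cost basis", "avg cost", "average cost", "cost per share",
--                      "purchase price", "cost/share", "unit cost", "average price"]:
--         for i, h in enumerate(headers_lower):
--             if pattern in h:
--                 mapping["cost"] = headers[i]
--                 break
--         if "cost" in mapping:
--             break
--
--     # Fallback: try "price" if no cost found
--     if "cost" not in mapping:
--         for pattern in ["price", "last price", "current price"]:
--             for i, h in enumerate(headers_lower):
--                 if pattern in h: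
--                     mapping["cost"] = headers[i]
--                     break
--             if "cost" in mapping:
--                 break
--
--     return mapping
-- ===== SOURCE B (Python) =====
-- _CONFIG = [
--     ("ticker", ["symbol", "ticker", "stock symbol", "sym"], None),
--     ("shares", ["quantity", "shares", "qty", "units", "share"], "price"),
--     ("cost", ["cost basis", "avg cost", "average cost", "cost per share",
--               "purchase price", "cost/share", "unit cost", "average price",
--               "price", "last price", "current price"], None),
-- ]
--
--
-- def _first_rank(patterns, low):
--     """Rank of the first pattern contained in low, or None."""
--     return next((r for r, p in enumerate(patterns) if p in low), None)
--
--
-- def _best(patterns, pairs, excl):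
--     """Header whose (pattern rank, position) is lexicographically minimal."""
--     best = None  # (rank, original header)
--     for low, orig in pairs:
--         if excl is not None and excl in low:
--             continue
--         r = _first_rank(patterns, low)
--         if r is not None and (best is None or r < best[0]):
--             best = (r, orig)
--     return None if best is None else best[1]
--
--
-- def _detect_csv_mapping(headers):
--     """Auto-detect CSV column mapping for common brokerage formats."""
--     pairs = [(h.lower().strip(), h) for h in headers]
--     mapping = {}
--     for field, patterns, excl in _CONFIG:
--         hit = _best(patterns, pairs, excl)
--         if hit is not None:
--             mapping[field] = hit
--     return mapping
-- ===== Notes on version B (the rewrite author's own statement) =====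
-- stated objective: alternative
-- what changed: Replaces the four pattern-outer/header-inner break loops (plus the separate price fallback block) by a data-driven config table with the fallback patterns merged after the cost patterns, and one pass per field over the headers maintaining the lexicographic minimum of (pattern rank, header position).
import Mathlib
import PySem

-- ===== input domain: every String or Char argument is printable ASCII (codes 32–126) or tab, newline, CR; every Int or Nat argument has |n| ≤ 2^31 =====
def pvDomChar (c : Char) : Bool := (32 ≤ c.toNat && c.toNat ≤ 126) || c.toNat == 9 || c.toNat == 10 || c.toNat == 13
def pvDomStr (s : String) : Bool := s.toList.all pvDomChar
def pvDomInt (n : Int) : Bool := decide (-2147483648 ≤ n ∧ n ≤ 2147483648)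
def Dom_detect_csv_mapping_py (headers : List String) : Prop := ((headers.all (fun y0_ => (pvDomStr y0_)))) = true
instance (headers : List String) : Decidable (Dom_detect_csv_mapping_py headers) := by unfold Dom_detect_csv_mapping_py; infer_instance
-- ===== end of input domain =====

-- B replaces A's pattern-outer break loops and price-fallback block by a config table and
-- one min-tracking pass per field over the headers (objective: alternative decomposition).

-- h.lower().strip(), shared preprocessing of both Pythons
def pyKey (h : String) : String := PySem.Str.strip (PySem.Str.lower h)

-- ===== PORT A =====
-- inner loop: first header (as (lowered, original) pair) whose lowered form satisfies m
def aScan (m : String → String → Bool) (p : String) : List (String × String) → Option String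
  | [] => none
  | pr :: rest => if m p pr.1 then some pr.2 else aScan m p rest

-- outer loop: patterns in priority order, break on first hit
def aLoop (m : String → String → Bool) : List String → List (String × String) → Option String
  | [], _ => none
  | p :: ps, pairs =>
    match aScan m p pairs with
    | some v => some v
    | none => aLoop m ps pairs

def detect_csv_mapping_py (headers : List String) : List (String × String) :=
  let pairs := headers.map (fun h => (pyKey h, h))
  let mT : String → String → Bool := fun p low => PySem.Str.isIn p low
  let mS : String → String → Bool := fun p low => PySem.Str.isIn p low && !(PySem.Str.isIn "price" low)
  let ticker := aLoop mT ["symbol", "ticker", "stock symbol", "sym"] pairs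
  let shares := aLoop mS ["quantity", "shares", "qty", "units", "share"] pairs
  let cost0 := aLoop mT ["cost basis", "avg cost", "average cost", "cost per share",
                         "purchase price", "cost/share", "unit cost", "average price"] pairs
  let cost := match cost0 with
    | some v => some v
    | none => aLoop mT ["price", "last price", "current price"] pairs
  (match ticker with | some v => [("ticker", v)] | none => []) ++
  (match shares with | some v => [("shares", v)] | none => []) ++
  (match cost with | some v => [("cost", v)] | none => [])

-- ===== PORT B =====
-- rank of the first pattern contained in low (next(... enumerate(patterns) ...))
def bRank : List String → String → Option Nat
  | [], _ => none
  | p :: ps, low => if PySem.Str.isIn p low then some 0 else (bRank ps low).map (· + 1)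

-- keep the lexicographically smaller (rank, position): strict < on ranks keeps the earlier header
def bUpd (patterns : List String) (best : Option (Nat × String)) (pr : String × String) :
    Option (Nat × String) :=
  match bRank patterns pr.1 with
  | none => best
  | some r =>
    match best with
    | none => some (r, pr.2)
    | some (br, bo) => if r < br then some (r, pr.2) else some (br, bo)

def bStep (patterns : List String) (excl : Option String) (best : Option (Nat × String))
    (pr : String × String) : Option (Nat × String) :=
  match excl with
  | some e => if PySem.Str.isIn e pr.1 then best else bUpd patterns best pr
  | none => bUpd patterns best pr

def bBest (patterns : List String) (excl : Option String) (pairs : List (String × String)) :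
    Option String :=
  (pairs.foldl (bStep patterns excl) none).map (·.2)

def bConfig : List (String × List String × Option String) :=
  [("ticker", ["symbol", "ticker", "stock symbol", "sym"], none),
   ("shares", ["quantity", "shares", "qty", "units", "share"], some "price"),
   ("cost", ["cost basis", "avg cost", "average cost", "cost per share",
             "purchase price", "cost/share", "unit cost", "average price",
             "price", "last price", "current price"], none)]

def detect_csv_mapping_py_alt (headers : List String) : List (String × String) :=
  let pairs := headers.map (fun h => (pyKey h, h))
  bConfig.foldl
    (fun acc c =>
      match bBest c.2.1 c.2.2 pairs with
      | some v => acc ++ [(c.1, v)]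
      | none => acc) []

-- ===== PRECONDITION & SPEC =====
def Spec_detect_csv_mapping_py (headers : List String) (out : List (String × String)) : Prop := out = detect_csv_mapping_py_alt headers
instance (headers : List String) (out : List (String × String)) : Decidable (Spec_detect_csv_mapping_py headers out) := by unfold Spec_detect_csv_mapping_py; infer_instance

-- ===== CLAIM (what is proved, stated in full; the proofs are below) =====
def Claim_equal_detect_csv_mapping_py : Prop := ∀ (headers : List String), Dom_detect_csv_mapping_py headers → Spec_detect_csv_mapping_py headers (detect_csv_mapping_py headers)

-- ===== LEMMAS AND PROOFS =====

-- generic min-tracking machinery, parameterized by the match predicate m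
def gRank (m : String → String → Bool) : List String → String → Option Nat
  | [], _ => none
  | p :: ps, low => if m p low then some 0 else (gRank m ps low).map (· + 1)

def gStep (m : String → String → Bool) (patterns : List String) (best : Option (Nat × String))
    (pr : String × String) : Option (Nat × String) :=
  match gRank m patterns pr.1 with
  | none => best
  | some r =>
    match best with
    | none => some (r, pr.2)
    | some (br, bo) => if r < br then some (r, pr.2) else some (br, bo)

def shiftO : Option (Nat × String) → Option (Nat × String) :=
  Option.map (fun x => (x.1 + 1, x.2))

-- bridges: B's concrete step is the generic step at the right predicate
theorem bRank_eq_gRank (ps : List String) (low : String) :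
    bRank ps low = gRank (fun p l => PySem.Str.isIn p l) ps low := by
  induction ps with
  | nil => rfl
  | cons p ps ih => simp [bRank, gRank, ih]

theorem gRank_none_of_all_false (m : String → String → Bool) (ps : List String) (low : String)
    (h : ∀ p ∈ ps, m p low = false) : gRank m ps low = none := by
  induction ps with
  | nil => rfl
  | cons p ps ih =>
    simp [gRank, h p (by simp)]
    exact ih (fun q hq => h q (by simp [hq]))

theorem bStep_none_eq (patterns : List String) (best : Option (Nat × String))
    (pr : String × String) :
    bStep patterns none best pr = gStep (fun p l => PySem.Str.isIn p l) patterns best pr := by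
  simp [bStep, bUpd, gStep, bRank_eq_gRank]

theorem bStep_some_eq (patterns : List String) (e : String) (best : Option (Nat × String))
    (pr : String × String) :
    bStep patterns (some e) best pr =
      gStep (fun p l => PySem.Str.isIn p l && !(PySem.Str.isIn e l)) patterns best pr := by
  cases he : PySem.Str.isIn e pr.1 with
  | true =>
    have hnone : gRank (fun p l => PySem.Str.isIn p l && !(PySem.Str.isIn e l)) patterns pr.1 =
        none :=
      gRank_none_of_all_false _ _ _
        (fun p _ => by rw [he]; simp only [Bool.not_true, Bool.and_false])
    simp only [bStep, gStep, hnone, he, if_true]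
  | false =>
    have hsame : ∀ ps, gRank (fun p l => PySem.Str.isIn p l && !(PySem.Str.isIn e l)) ps pr.1 =
        gRank (fun p l => PySem.Str.isIn p l) ps pr.1 := by
      intro ps
      induction ps with
      | nil => rfl
      | cons p ps ih =>
        simp only [gRank, he, Bool.not_false, Bool.and_true, ih]
    simp only [bStep, he, Bool.false_eq_true, if_false, bUpd, gStep, bRank_eq_gRank, hsame]

-- patterns = []: the fold is the identity
theorem foldl_gStep_nil (m : String → String → Bool) (pairs : List (String × String))
    (b : Option (Nat × String)) : pairs.foldl (gStep m []) b = b := by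
  induction pairs generalizing b with
  | nil => rfl
  | cons pr rest ih => simpa [gStep, gRank] using ih b

-- a best of rank 0 is absorbing
theorem foldl_gStep_zero (m : String → String → Bool) (pats : List String)
    (pairs : List (String × String)) (o : String) :
    pairs.foldl (gStep m pats) (some (0, o)) = some (0, o) := by
  induction pairs with
  | nil => rfl
  | cons pr rest ih =>
    have : gStep m pats (some (0, o)) pr = some (0, o) := by
      unfold gStep
      cases gRank m pats pr.1 with
      | none => rfl
      | some r => simp
    simpa [this] using ih

-- if p matches nowhere in pairs, the (p :: ps)-fold is the shifted ps-fold
theorem foldl_gStep_shift (m : String → String → Bool) (p : String) (ps : List String)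
    (pairs : List (String × String)) (b : Option (Nat × String))
    (h : ∀ pr ∈ pairs, m p pr.1 = false) :
    pairs.foldl (gStep m (p :: ps)) (shiftO b) = shiftO (pairs.foldl (gStep m ps) b) := by
  induction pairs generalizing b with
  | nil => rfl
  | cons pr rest ih =>
    have hstep : gStep m (p :: ps) (shiftO b) pr = shiftO (gStep m ps b pr) := by
      unfold gStep
      rw [show gRank m (p :: ps) pr.1 = (gRank m ps pr.1).map (· + 1) by
        simp [gRank, h pr (by simp)]]
      cases gRank m ps pr.1 with
      | none => rfl
      | some r =>
        cases b with
        | none => rfl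
        | some x =>
          simp only [shiftO, Option.map]
          split_ifs with h1 h2 h2 <;> simp_all
    simp only [List.foldl_cons, hstep]
    exact ih _ (fun q hq => h q (by simp [hq]))

theorem aScan_none (m : String → String → Bool) (p : String) (pairs : List (String × String))
    (h : ∀ pr ∈ pairs, m p pr.1 = false) : aScan m p pairs = none := by
  induction pairs with
  | nil => rfl
  | cons pr rest ih =>
    simp [aScan, h pr (by simp)]
    exact ih (fun q hq => h q (by simp [hq]))

-- main lemma: B's min-tracking pass computes A's first-pattern-then-first-header choice
theorem gFold_eq_aLoop (m : String → String → Bool) (pats : List String)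
    (pairs : List (String × String)) :
    (pairs.foldl (gStep m pats) none).map (·.2) = aLoop m pats pairs := by
  induction pats with
  | nil => simp [foldl_gStep_nil, aLoop]
  | cons p ps ih =>
    by_cases hex : ∀ pr ∈ pairs, m p pr.1 = false
    · have h1 : pairs.foldl (gStep m (p :: ps)) none = shiftO (pairs.foldl (gStep m ps) none) := by
        simpa [shiftO] using foldl_gStep_shift m p ps pairs none hex
      have h2 : ((shiftO (pairs.foldl (gStep m ps) none)).map (·.2)) =
          (pairs.foldl (gStep m ps) none).map (·.2) := by
        cases pairs.foldl (gStep m ps) none <;> simp [shiftO]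
      rw [h1, h2, ih, aLoop, aScan_none m p pairs hex]
    · -- split pairs at the first p-match
      have hdw : pairs.dropWhile (fun pr : String × String => !m p pr.1) ≠ [] := by
        intro hnil
        apply hex
        intro pr hpr
        have := List.dropWhile_eq_nil_iff.mp hnil pr hpr
        simpa using this
      obtain ⟨pr0, l2, hd⟩ := List.exists_cons_of_ne_nil hdw
      have hsplit : pairs = pairs.takeWhile (fun pr : String × String => !m p pr.1) ++ pr0 :: l2 := by
        rw [← hd]; exact (List.takeWhile_append_dropWhile).symm
      have hl1 : ∀ pr ∈ pairs.takeWhile (fun pr : String × String => !m p pr.1),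
          m p pr.1 = false := by
        intro pr hpr
        have := List.mem_takeWhile_imp hpr
        simpa using this
      have hpr0 : m p pr0.1 = true := by
        have hfind : pairs.find? (fun pr : String × String => m p pr.1) = some pr0 := by
          rw [List.find?_eq_head?_dropWhile_not, hd, List.head?_cons]
        simpa using List.find?_some (p := fun pr : String × String => m p pr.1) hfind
      -- A side
      have hA : aLoop m (p :: ps) pairs = some pr0.2 := by
        have hscan : aScan m p pairs = some pr0.2 := by
          rw [hsplit]
          have hgen : ∀ l1, (∀ pr ∈ l1, m p pr.1 = false) →
              aScan m p (l1 ++ pr0 :: l2) = some pr0.2 := by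
            intro l1 h1
            induction l1 with
            | nil => simp [aScan, hpr0]
            | cons q qs ihq =>
              simp [aScan, h1 q (by simp)]
              exact ihq (fun x hx => h1 x (by simp [hx]))
          exact hgen _ hl1
        simp [aLoop, hscan]
      -- B side
      have hB : pairs.foldl (gStep m (p :: ps)) none = some (0, pr0.2) := by
        have hstep0 : ∀ X : Option (Nat × String),
            gStep m (p :: ps) (shiftO X) pr0 = some (0, pr0.2) := by
          intro X
          unfold gStep
          rw [show gRank m (p :: ps) pr0.1 = some 0 by simp [gRank, hpr0]]
          cases X with
          | none => simp [shiftO]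
          | some x => simp [shiftO]
        rw [hsplit, List.foldl_append]
        rw [show (pairs.takeWhile (fun pr : String × String => !m p pr.1)).foldl
              (gStep m (p :: ps)) none =
            shiftO ((pairs.takeWhile (fun pr : String × String => !m p pr.1)).foldl
              (gStep m ps) none) by
          simpa [shiftO] using
            foldl_gStep_shift m p ps (pairs.takeWhile (fun pr : String × String => !m p pr.1))
              none hl1]
        simp only [List.foldl_cons, hstep0]
        exact foldl_gStep_zero m (p :: ps) l2 pr0.2
      rw [hA, hB]
      rfl

theorem aLoop_append (m : String → String → Bool) (xs ys : List String)
    (pairs : List (String × String)) :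
    aLoop m (xs ++ ys) pairs =
      match aLoop m xs pairs with
      | some v => some v
      | none => aLoop m ys pairs := by
  induction xs with
  | nil => simp [aLoop]
  | cons x xs ih =>
    simp only [List.cons_append, aLoop]
    cases aScan m x pairs <;> simp [ih]

theorem bBest_none (pats : List String) (pairs : List (String × String)) :
    bBest pats none pairs = aLoop (fun p l => PySem.Str.isIn p l) pats pairs := by
  unfold bBest
  rw [show bStep pats none = gStep (fun p l => PySem.Str.isIn p l) pats by
    funext b pr; exact bStep_none_eq pats b pr]
  exact gFold_eq_aLoop _ _ _

theorem bBest_some (pats : List String) (e : String) (pairs : List (String × String)) :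
    bBest pats (some e) pairs =
      aLoop (fun p l => PySem.Str.isIn p l && !(PySem.Str.isIn e l)) pats pairs := by
  unfold bBest
  rw [show bStep pats (some e) =
      gStep (fun p l => PySem.Str.isIn p l && !(PySem.Str.isIn e l)) pats by
    funext b pr; exact bStep_some_eq pats e b pr]
  exact gFold_eq_aLoop _ _ _

-- ===== VERDICT (by name: the statement is the Claim_ definition above) =====
theorem detect_csv_mapping_py_spec : Claim_equal_detect_csv_mapping_py := by
  intro headers _
  unfold Spec_detect_csv_mapping_py detect_csv_mapping_py detect_csv_mapping_py_alt
  simp only [bConfig, List.foldl_cons, List.foldl_nil, bBest_none, bBest_some]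
  rw [show (["cost basis", "avg cost", "average cost", "cost per share", "purchase price",
        "cost/share", "unit cost", "average price", "price", "last price", "current price"] :
        List String) =
      ["cost basis", "avg cost", "average cost", "cost per share", "purchase price",
        "cost/share", "unit cost", "average price"] ++ ["price", "last price", "current price"]
      from rfl, aLoop_append]
  cases aLoop (fun p l => PySem.Str.isIn p l) ["symbol", "ticker", "stock symbol", "sym"]
      (headers.map (fun h => (pyKey h, h))) <;>
    cases aLoop (fun p l => PySem.Str.isIn p l && !(PySem.Str.isIn "price" l))
        ["quantity", "shares", "qty", "units", "share"] (headers.map (fun h => (pyKey h, h))) <;>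
    cases aLoop (fun p l => PySem.Str.isIn p l) ["cost basis", "avg cost", "average cost",
        "cost per share", "purchase price", "cost/share", "unit cost", "average price"]
        (headers.map (fun h => (pyKey h, h))) <;>
    cases aLoop (fun p l => PySem.Str.isIn p l) ["price", "last price", "current price"]
        (headers.map (fun h => (pyKey h, h))) <;>
    simp
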